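-- pv_equiv track=rewrite | github.com/tirthpatel618/leetcode_sols | test.py | find_optimal_sequence
-- ===== SOURCE A (Python) =====
-- def find_optimal_sequence(r):
--     """
--     Find an actual sequence that achieves the maximum length.
--
--     Args:
--         r: Upper bound (exclusive) for array elements
--
--     Returns:
--         A list representing an optimal sequence
--     """
--     if r <= 1:
--         return []
--
--     # Store the best sequence ending at each value
--     sequences = {}
--
--     # Initialize with all possible starting values
--     for start_val in range(1, r):
--         sequences[start_val] = [start_val]
--
--     # Build sequences
--     changed = True
--     while changed:
--         changed = False
--         new_sequences = sequences.copy()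
--
--         for val, seq in sequences.items():
--             # Try doubling
--             next_val = 2 * val
--             if next_val < r:
--                 new_seq = seq + [next_val]
--                 if (next_val not in new_sequences or
--                     len(new_sequences[next_val]) < len(new_seq)):
--                     new_sequences[next_val] = new_seq
--                     changed = True
--
--             # Try adding 6
--             next_val = val + 6
--             if next_val < r:
--                 new_seq = seq + [next_val]
--                 if (next_val not in new_sequences or
--                     len(new_sequences[next_val]) < len(new_seq)):
--                     new_sequences[next_val] = new_seq
--                     changed = True
--
--         sequences = new_sequences
--
--     # Find the longest sequence
--     max_seq = []
--     for seq in sequences.values():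
--         if len(seq) > len(max_seq):
--             max_seq = seq
--
--     return max_seq
-- ===== SOURCE B (Python) =====
-- def find_optimal_sequence(r):
--     """Same result as the fixpoint iteration, computed by one ascending DP pass:
--     the best sequence ending at v extends the best sequence at v//2 (if v even)
--     or v-6 (if v >= 7), trying the smaller predecessor first."""
--     if r <= 1:
--         return []
--     best = {}
--     ans = []
--     for v in range(1, r):
--         if v % 2 == 0:
--             if v >= 7:
--                 if v - 6 < v // 2:
--                     preds = [v - 6, v // 2]
--                 else:
--                     preds = [v // 2, v - 6]
--             else:
--                 preds = [v // 2]
--         else: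
--             preds = [v - 6] if v >= 7 else []
--         seq = [v]
--         for p in preds:
--             cand = best[p] + [v]
--             if len(seq) < len(cand):
--                 seq = cand
--         best[v] = seq
--         if len(ans) < len(seq):
--             ans = seq
--     return ans
-- ===== Notes on version B (the rewrite author's own statement) =====
-- stated objective: faster
-- what changed: Replaced the repeated whole-dictionary fixpoint rounds (rebuild every sequence until nothing changes) by a single ascending dynamic-programming pass that computes the best sequence ending at each value from its at-most-two predecessors (v/2 and v-6) once.
import Mathlib
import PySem

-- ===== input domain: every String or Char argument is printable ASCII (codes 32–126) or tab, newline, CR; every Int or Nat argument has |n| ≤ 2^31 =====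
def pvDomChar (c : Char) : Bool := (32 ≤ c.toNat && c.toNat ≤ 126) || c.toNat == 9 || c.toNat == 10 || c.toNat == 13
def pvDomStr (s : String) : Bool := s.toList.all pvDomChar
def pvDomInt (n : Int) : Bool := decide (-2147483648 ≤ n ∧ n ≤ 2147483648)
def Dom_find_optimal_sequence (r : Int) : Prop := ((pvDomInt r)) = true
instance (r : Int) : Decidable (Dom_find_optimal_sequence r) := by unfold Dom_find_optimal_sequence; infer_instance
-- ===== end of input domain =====

-- B replaces A's repeated whole-dictionary fixpoint rounds by one ascending DP pass
-- (each value's best sequence is computed once from its ≤2 predecessors v/2 and v-6): faster.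

-- ===== PORT A =====
-- shared helper: `if len(cur) < len(cand): cur = cand` (appears verbatim in both Pythons)
def pvPick (s c : List Int) : List Int := if s.length < c.length then c else s

-- one item of the `for val, seq in sequences.items()` body (doubling try, then +6 try)
def pvAStep (r : Int) (st : PySem.Dict Int (List Int) × Bool) (it : Int × List Int) :
    PySem.Dict Int (List Int) × Bool :=
  let st1 :=
    if 2 * it.1 < r then
      if !(st.1.contains (2 * it.1)) || decide ((st.1.getD (2 * it.1) []).length < (it.2 ++ [2 * it.1]).length) then
        (st.1.insert (2 * it.1) (it.2 ++ [2 * it.1]), true)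
      else st
    else st
  if it.1 + 6 < r then
    if !(st1.1.contains (it.1 + 6)) || decide ((st1.1.getD (it.1 + 6) []).length < (it.2 ++ [it.1 + 6]).length) then
      (st1.1.insert (it.1 + 6) (it.2 ++ [it.1 + 6]), true)
    else st1
  else st1

-- the `while changed:` loop; fuel only makes the recursion structural (the loop provably
-- converges within r² + 1 rounds, proved below), the `changed` exit test is unchanged
def pvALoop (r : Int) : Nat → PySem.Dict Int (List Int) → PySem.Dict Int (List Int)
  | 0, seqs => seqs
  | fuel + 1, seqs =>
    let res := seqs.items.foldl (pvAStep r) (seqs, false)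
    if res.2 then pvALoop r fuel res.1 else seqs

def find_optimal_sequence (r : Int) : List Int :=
  if r ≤ 1 then []
  else
    let init := (PySem.List.pyRange 1 r 1).foldl (fun d v => d.insert v [v]) PySem.Dict.empty
    let fin := pvALoop r (r.toNat * r.toNat + 1) init
    fin.values.foldl pvPick []

-- ===== PORT B =====
-- the predecessor list of v (ascending), as built by Source B's nested ifs
def pvPredL (v : Int) : List Int :=
  if PySem.Int.mod v 2 = 0 then
    if 7 ≤ v then
      if v - 6 < PySem.Int.floordiv v 2 then [v - 6, PySem.Int.floordiv v 2]
      else [PySem.Int.floordiv v 2, v - 6]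
    else [PySem.Int.floordiv v 2]
  else if 7 ≤ v then [v - 6] else []

-- Source B's `best[p]` never misses (p < v is already stored); getD is its total form
def find_optimal_sequence_alt (r : Int) : List Int :=
  if r ≤ 1 then []
  else
    ((PySem.List.pyRange 1 r 1).foldl
      (fun (st : PySem.Dict Int (List Int) × List Int) v =>
        let seq := (pvPredL v).foldl (fun s p => pvPick s (st.1.getD p [] ++ [v])) [v]
        (st.1.insert v seq, pvPick st.2 seq))
      (PySem.Dict.empty, [])).2

-- ===== PRECONDITION & SPEC =====
def Spec_find_optimal_sequence (r : Int) (out : List Int) : Prop := out = find_optimal_sequence_alt r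
instance (r : Int) (out : List Int) : Decidable (Spec_find_optimal_sequence r out) := by unfold Spec_find_optimal_sequence; infer_instance

-- ===== CLAIM (what is proved, stated in full; the proofs are below) =====
def Claim_equal_find_optimal_sequence : Prop := ∀ (r : Int), Dom_find_optimal_sequence r → Spec_find_optimal_sequence r (find_optimal_sequence r)

-- ===== LEMMAS AND PROOFS =====

theorem pvPredL_eq (v : Int) :
    pvPredL v =
      if v % 2 = 0 then
        if 7 ≤ v then
          if v - 6 < v / 2 then [v - 6, v / 2] else [v / 2, v - 6]
        else [v / 2]
      else if 7 ≤ v then [v - 6] else [] := by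
  simp [pvPredL]

theorem pvPredL_bounds {v p : Int} (hv : 1 ≤ v) (hp : p ∈ pvPredL v) : 1 ≤ p ∧ p < v := by
  rw [pvPredL_eq] at hp
  split_ifs at hp <;> simp at hp <;> omega

theorem pvPick_length (s c : List Int) : (pvPick s c).length = max s.length c.length := by
  unfold pvPick; split_ifs <;> omega

def pvMaxLen (cs : List (List Int)) : Nat := cs.foldr (fun c n => max c.length n) 0

theorem pvMaxLen_le {cs : List (List Int)} {n : Nat} (h : ∀ c ∈ cs, c.length ≤ n) :
    pvMaxLen cs ≤ n := by
  induction cs with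
  | nil => simp [pvMaxLen]
  | cons c cs ih =>
    simp only [pvMaxLen, List.foldr] at *
    have := h c (by simp)
    have := ih (fun c hc => h c (by simp [hc]))
    omega

theorem pvLe_maxLen {cs : List (List Int)} {c : List Int} (h : c ∈ cs) :
    c.length ≤ pvMaxLen cs := by
  induction cs with
  | nil => simp at h
  | cons d cs ih =>
    rcases List.mem_cons.1 h with h | h
    · subst h; simp only [pvMaxLen, List.foldr]; omega
    · have := ih h; simp only [pvMaxLen, List.foldr] at *; omega

theorem pvMaxLen_sublist {cs cs' : List (List Int)} (h : cs.Sublist cs') :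
    pvMaxLen cs ≤ pvMaxLen cs' := by
  induction h with
  | slnil => simp
  | cons a _ ih => simp only [pvMaxLen, List.foldr] at *; omega
  | cons₂ a _ ih => simp only [pvMaxLen, List.foldr] at *; omega

theorem pvFoldPick_length (cs : List (List Int)) (s : List Int) :
    (cs.foldl pvPick s).length = max s.length (pvMaxLen cs) := by
  induction cs generalizing s with
  | nil => simp [pvMaxLen]
  | cons c cs ih =>
    simp only [List.foldl, pvMaxLen, List.foldr] at *
    rw [ih, pvPick_length]; omega

theorem pvFoldPick_eq_self {cs : List (List Int)} {s : List Int}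
    (h : ∀ c ∈ cs, c.length ≤ s.length) : cs.foldl pvPick s = s := by
  induction cs with
  | nil => rfl
  | cons c cs ih =>
    have h1 : pvPick s c = s := by unfold pvPick; rw [if_neg]; have := h c (by simp); omega
    simp only [List.foldl, h1]
    exact ih (fun c hc => h c (by simp [hc]))

theorem pvFoldPick_init_irrel {cs : List (List Int)} {s₁ s₂ : List Int}
    (h₁ : s₁.length < pvMaxLen cs) (h₂ : s₂.length < pvMaxLen cs) :
    cs.foldl pvPick s₁ = cs.foldl pvPick s₂ := by
  induction cs generalizing s₁ s₂ with
  | nil => simp [pvMaxLen] at h₁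
  | cons c cs ih =>
    have hM : pvMaxLen (c :: cs) = max c.length (pvMaxLen cs) := rfl
    rw [hM] at h₁ h₂
    simp only [List.foldl]
    rcases Nat.lt_or_ge s₁.length c.length with k₁ | k₁ <;>
      rcases Nat.lt_or_ge s₂.length c.length with k₂ | k₂
    · rw [show pvPick s₁ c = c from if_pos k₁, show pvPick s₂ c = c from if_pos k₂]
    · rw [show pvPick s₁ c = c from if_pos k₁, show pvPick s₂ c = s₂ from if_neg (by omega)]
      exact ih (by omega) (by omega)
    · rw [show pvPick s₁ c = s₁ from if_neg (by omega), show pvPick s₂ c = c from if_pos k₂]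
      exact ih (by omega) (by omega)
    · rw [show pvPick s₁ c = s₁ from if_neg (by omega), show pvPick s₂ c = s₂ from if_neg (by omega)]
      exact ih (by omega) (by omega)
theorem pvPredL_one : pvPredL 1 = [] := by decide

def pvBest (v : Int) : List Int :=
  if _h : v < 2 then [v]
  else (pvPredL v).attach.foldl (fun s p => pvPick s (pvBest p.1 ++ [v])) [v]
termination_by v.toNat
decreasing_by
  have h2 := pvPredL_bounds (by omega : (1:Int) ≤ v) p.2
  omega

def pvCands (f : Int → List Int) (v : Int) : List (List Int) :=
  (pvPredL v).map (fun p => f p ++ [v])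

theorem pvMaxLen_cons (c : List Int) (cs : List (List Int)) :
    pvMaxLen (c :: cs) = max c.length (pvMaxLen cs) := rfl

theorem pvBest_eq (v : Int) (hv : 1 ≤ v) :
    pvBest v = (pvCands pvBest v).foldl pvPick [v] := by
  by_cases h : v < 2
  · have hv1 : v = 1 := by omega
    subst hv1
    rw [pvBest]
    simp [pvCands, pvPredL_one]
  · rw [pvBest, dif_neg h]
    simp only [pvCands, List.foldl_map]
    exact List.foldl_attach (l := pvPredL v) (f := fun s p => pvPick s (pvBest p ++ [v])) (b := [v])

theorem pvBest_len (v : Int) (hv : 1 ≤ v) :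
    (pvBest v).length = max 1 (pvMaxLen (pvCands pvBest v)) := by
  rw [pvBest_eq v hv, pvFoldPick_length]
  rfl

theorem pvBest_len_pos (v : Int) (hv : 1 ≤ v) : 1 ≤ (pvBest v).length := by
  rw [pvBest_len v hv]; omega

def pvBk : Nat → Int → List Int
  | 0, v => [v]
  | k + 1, v => (pvCands (pvBk k) v).foldl pvPick (pvBk k v)

theorem pvBk_succ (k : Nat) (v : Int) :
    pvBk (k + 1) v = (pvCands (pvBk k) v).foldl pvPick (pvBk k v) := rfl

theorem pvMaxLen_min_map {l : List Int} {f g : Int → List Int} {v : Int} {K : Nat}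
    (h : ∀ p ∈ l, (f p).length = min (g p).length K) :
    pvMaxLen (l.map (fun p => f p ++ [v])) = min (pvMaxLen (l.map (fun p => g p ++ [v]))) (K + 1) := by
  induction l with
  | nil => simp [pvMaxLen]
  | cons p l ih =>
    simp only [List.map, pvMaxLen_cons, List.length_append, List.length_cons, List.length_nil]
    rw [ih (fun q hq => h q (by simp [hq]))]
    have := h p (by simp)
    omega

theorem pvBk_length (k : Nat) : ∀ v : Int, 1 ≤ v →
    (pvBk k v).length = min (pvBest v).length (k + 1) := by
  induction k with
  | zero =>
    intro v hv
    have := pvBest_len_pos v hv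
    simp only [pvBk, List.length_cons, List.length_nil]
    omega
  | succ k ih =>
    intro v hv
    rw [pvBk_succ, pvFoldPick_length, ih v hv]
    have hmm : pvMaxLen (pvCands (pvBk k) v) = min (pvMaxLen (pvCands pvBest v)) (k + 1 + 1) := by
      unfold pvCands
      exact pvMaxLen_min_map (fun p hp => ih p (pvPredL_bounds hv hp).1)
    rw [hmm]
    have hL := pvBest_len v hv
    omega

theorem pvCand_le {v : Int} (hv : 1 ≤ v) : ∀ c ∈ pvCands pvBest v, c.length ≤ (pvBest v).length := by
  intro c hc
  have h1 := pvLe_maxLen hc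
  have h2 := pvBest_len v hv
  omega

theorem pvBk_eq_best (k : Nat) : ∀ v : Int, 1 ≤ v → (pvBest v).length ≤ k + 1 →
    pvBk k v = pvBest v := by
  induction k with
  | zero =>
    intro v hv h
    have hnil : pvPredL v = [] := by
      cases hl : pvPredL v with
      | nil => rfl
      | cons p l =>
        have hp : p ∈ pvPredL v := by rw [hl]; simp
        have hb := pvPredL_bounds hv hp
        have hm : (pvBest p ++ [v]) ∈ pvCands pvBest v := List.mem_map_of_mem hp
        have h1 := pvLe_maxLen hm
        have h2 := pvBest_len v hv
        have h3 := pvBest_len_pos p hb.1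
        simp only [List.length_append, List.length_cons, List.length_nil] at h1
        omega
    rw [pvBest_eq v hv]
    simp [pvCands, hnil, pvBk]
  | succ k ih =>
    intro v hv h
    have hcand_eq : pvCands (pvBk k) v = pvCands pvBest v := by
      unfold pvCands
      apply List.map_congr_left
      intro p hp
      have hb := pvPredL_bounds hv hp
      have hm : (pvBest p ++ [v]) ∈ pvCands pvBest v := List.mem_map_of_mem hp
      have h1 := pvLe_maxLen hm
      have h2 := pvBest_len v hv
      simp only [List.length_append, List.length_cons, List.length_nil] at h1
      rw [ih p hb.1 (by omega)]
    by_cases hc : (pvBest v).length ≤ k + 1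
    · rw [pvBk_succ, hcand_eq, ih v hv hc]
      exact pvFoldPick_eq_self (pvCand_le hv)
    · have hM : pvMaxLen (pvCands pvBest v) = (pvBest v).length := by
        have := pvBest_len v hv; omega
      have h1 : (pvBk k v).length < pvMaxLen (pvCands pvBest v) := by
        rw [hM, pvBk_length k v hv]; omega
      have h2 : ([v] : List Int).length < pvMaxLen (pvCands pvBest v) := by
        simp only [List.length_cons, List.length_nil, hM]; omega
      rw [pvBk_succ, hcand_eq, pvBest_eq v hv]
      exact pvFoldPick_init_irrel h1 h2

theorem pvBk_len_le (k : Nat) : ∀ v : Int, 1 ≤ v → (pvBk k v).length ≤ v.toNat := by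
  induction k with
  | zero => intro v hv; simp [pvBk]; omega
  | succ k ih =>
    intro v hv
    rw [pvBk_succ, pvFoldPick_length]
    have h1 := ih v hv
    have h2 : pvMaxLen (pvCands (pvBk k) v) ≤ v.toNat := by
      apply pvMaxLen_le
      intro c hc
      rcases List.mem_map.1 hc with ⟨p, hp, rfl⟩
      have hb := pvPredL_bounds hv hp
      have := ih p hb.1
      simp only [List.length_append, List.length_cons, List.length_nil]
      omega
    omega

theorem pvBk_stable_best {r : Int} {k : Nat}
    (h : ∀ v, 1 ≤ v → v < r → pvBk (k + 1) v = pvBk k v) :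
    ∀ v, 1 ≤ v → v < r → pvBk k v = pvBest v := by
  have step : ∀ j, ∀ v, 1 ≤ v → v < r → pvBk (k + 1 + j) v = pvBk (k + j) v := by
    intro j
    induction j with
    | zero => exact h
    | succ j ih =>
      intro v hv hvr
      rw [show k + 1 + (j + 1) = (k + 1 + j) + 1 from rfl, show k + (j + 1) = (k + j) + 1 from rfl,
          pvBk_succ, pvBk_succ]
      have hcand : pvCands (pvBk (k + 1 + j)) v = pvCands (pvBk (k + j)) v := by
        unfold pvCands
        apply List.map_congr_left
        intro p hp
        have hb := pvPredL_bounds hv hp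
        rw [ih p hb.1 (by omega)]
      rw [hcand, ih v hv hvr]
  have hup : ∀ j, ∀ v, 1 ≤ v → v < r → pvBk (k + j) v = pvBk k v := by
    intro j
    induction j with
    | zero => intro v _ _; rfl
    | succ j ih =>
      intro v hv hvr
      have h1 := step j v hv hvr
      rw [show k + (j + 1) = k + 1 + j by omega, h1, ih v hv hvr]
  intro v hv hvr
  have h1 := hup (pvBest v).length v hv hvr
  have h2 := pvBk_eq_best (k + (pvBest v).length) v hv (by omega)
  rw [← h1, h2]
def pvDictOf (r : Int) (f : Int → List Int) : PySem.Dict Int (List Int) :=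
  PySem.Dict.mk ((PySem.List.pyRange 1 r 1).map (fun v => (v, f v)))

theorem pvDictOf_congr {r : Int} {f g : Int → List Int}
    (h : ∀ v, 1 ≤ v → v < r → f v = g v) : pvDictOf r f = pvDictOf r g := by
  apply PySem.Dict.ext
  apply List.map_congr_left
  intro v hv
  rw [PySem.List.mem_pyRange_one] at hv
  rw [h v hv.1 hv.2]

theorem pvDictOf_keys (r : Int) (f : Int → List Int) :
    (pvDictOf r f).keys = PySem.List.pyRange 1 r 1 := by
  simp [pvDictOf, PySem.Dict.keys, List.map_map, Function.comp_def]

theorem pvDictOf_nodup (r : Int) (f : Int → List Int) : (pvDictOf r f).keys.Nodup := by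
  rw [pvDictOf_keys]; exact PySem.List.nodup_pyRange_one 1 r

theorem pvDictOf_contains (r : Int) (f : Int → List Int) (w : Int) :
    (pvDictOf r f).contains w = decide (1 ≤ w ∧ w < r) := by
  rw [PySem.Dict.contains_eq_decide_mem_keys, pvDictOf_keys]
  exact decide_eq_decide.2 (PySem.List.mem_pyRange_one)

theorem pvDictOf_getD (r : Int) (f : Int → List Int) {w : Int} (h1 : 1 ≤ w) (h2 : w < r) :
    (pvDictOf r f).getD w [] = f w := by
  apply PySem.Dict.getD_of_mem_items
  · exact List.mem_map_of_mem (PySem.List.mem_pyRange_one.2 ⟨h1, h2⟩)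
  · exact pvDictOf_nodup r f

theorem pvDictOf_insert (r : Int) (f : Int → List Int) {w : Int} (c : List Int)
    (h1 : 1 ≤ w) (h2 : w < r) :
    (pvDictOf r f).insert w c = pvDictOf r (fun v => if v = w then c else f v) := by
  apply PySem.Dict.ext
  rw [PySem.Dict.items_insert_of_contains _ _
      (by rw [pvDictOf_contains]; exact decide_eq_true ⟨h1, h2⟩)]
  show List.map _ (List.map _ _) = _
  rw [List.map_map]
  apply List.map_congr_left
  intro v _
  by_cases hvw : v = w
  · subst hvw; simp
  · simp [Function.comp_def, hvw]

theorem pvDictOf_values (r : Int) (f : Int → List Int) :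
    (pvDictOf r f).values = (PySem.List.pyRange 1 r 1).map f := by
  simp [pvDictOf, PySem.Dict.values, List.map_map, Function.comp_def]

theorem pvDictOf_items (r : Int) (f : Int → List Int) :
    (pvDictOf r f).items = (PySem.List.pyRange 1 r 1).map (fun v => (v, f v)) := rfl

def pvUpd (g : Int → List Int) (nv : Int) (c : List Int) : Int → List Int :=
  fun u => if u = nv then pvPick (g u) c else g u

def pvPush (r : Int) (g : Int → List Int) (t : Int) (s : List Int) : Int → List Int :=
  let g1 := if 2 * t < r then pvUpd g (2 * t) (s ++ [2 * t]) else g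
  if t + 6 < r then pvUpd g1 (t + 6) (s ++ [t + 6]) else g1

def pvUpTo (f : Int → List Int) (t w : Int) : List Int :=
  (((pvPredL w).filter (fun p => decide (p < t))).map (fun p => f p ++ [w])).foldl
    pvPick (f w)

theorem pvUpTo_one (f : Int → List Int) (w : Int) (hw : 1 ≤ w) : pvUpTo f 1 w = f w := by
  unfold pvUpTo
  rw [List.filter_eq_nil_iff.2 (fun p hp => by
    have := pvPredL_bounds hw hp; simp; omega)]
  rfl

theorem pvUpTo_top (f : Int → List Int) {t w : Int} (hw : 1 ≤ w) (hwt : w < t) :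
    pvUpTo f t w = (pvCands f w).foldl pvPick (f w) := by
  unfold pvUpTo pvCands
  rw [List.filter_eq_self.2 (fun p hp => by
    have := pvPredL_bounds hw hp; simp; omega)]

theorem pvUpTo_len_mono (f : Int → List Int) {t t' : Int} (h : t ≤ t') (w : Int) :
    (pvUpTo f t w).length ≤ (pvUpTo f t' w).length := by
  unfold pvUpTo
  rw [pvFoldPick_length, pvFoldPick_length]
  have hs : ((((pvPredL w).filter (fun p => decide (p < t))).map (fun p => f p ++ [w]))).Sublist
      ((((pvPredL w).filter (fun p => decide (p < t'))).map (fun p => f p ++ [w]))) := by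
    apply List.Sublist.map
    apply List.monotone_filter_right
    intro p hp
    simp at hp ⊢
    omega
  have := pvMaxLen_sublist hs
  omega

theorem pvUpTo_len_ge (f : Int → List Int) (t w : Int) :
    (f w).length ≤ (pvUpTo f t w).length := by
  unfold pvUpTo
  rw [pvFoldPick_length]
  omega

theorem pvUpd_len_ge (g : Int → List Int) (nv : Int) (c : List Int) (u : Int) :
    (g u).length ≤ (pvUpd g nv c u).length := by
  unfold pvUpd pvPick
  split_ifs <;> omega

theorem pvStep1 (r : Int) (g : Int → List Int) (nv : Int) (c : List Int) (b : Bool)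
    (h1 : 1 ≤ nv) (h2 : nv < r) :
    (if !((pvDictOf r g).contains nv) || decide (((pvDictOf r g).getD nv []).length < c.length) then
       ((pvDictOf r g).insert nv c, true)
     else (pvDictOf r g, b))
    = (pvDictOf r (pvUpd g nv c), if (g nv).length < c.length then true else b) := by
  rw [pvDictOf_contains, pvDictOf_getD _ _ h1 h2, decide_eq_true (show 1 ≤ nv ∧ nv < r from ⟨h1, h2⟩)]
  simp only [Bool.not_true, Bool.false_or]
  by_cases hlen : (g nv).length < c.length
  · rw [if_pos (decide_eq_true hlen), if_pos hlen, pvDictOf_insert _ _ _ h1 h2]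
    refine Prod.ext ?_ rfl
    apply pvDictOf_congr
    intro v _ _
    unfold pvUpd
    by_cases hv : v = nv
    · subst hv; rw [if_pos rfl, if_pos rfl]; unfold pvPick; rw [if_pos hlen]
    · rw [if_neg hv, if_neg hv]
  · rw [if_neg (by simpa using hlen), if_neg hlen]
    refine Prod.ext ?_ rfl
    apply pvDictOf_congr
    intro v _ _
    unfold pvUpd
    by_cases hv : v = nv
    · subst hv; rw [if_pos rfl]; unfold pvPick; rw [if_neg hlen]
    · rw [if_neg hv]

theorem pvAStep_dictOf (r t : Int) (g : Int → List Int) (s : List Int) (b : Bool)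
    (h1 : 1 ≤ t) :
    ∃ b₂ : Bool,
      pvAStep r (pvDictOf r g, b) (t, s) = (pvDictOf r (pvPush r g t s), b₂)
      ∧ (b = true → b₂ = true)
      ∧ (b₂ = false → b = false ∧ ∀ u, pvPush r g t s u = g u)
      ∧ (b = false → b₂ = true →
          ∃ w, 1 ≤ w ∧ w < r ∧ (g w).length < (pvPush r g t s w).length) := by
  have hPush : pvPush r g t s
      = (fun gg => if t + 6 < r then pvUpd gg (t + 6) (s ++ [t + 6]) else gg)
        (if 2 * t < r then pvUpd g (2 * t) (s ++ [2 * t]) else g) := rfl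
  set g1 : Int → List Int := if 2 * t < r then pvUpd g (2 * t) (s ++ [2 * t]) else g with hg1
  have stage1 :
      (if 2 * t < r then
        (if !((pvDictOf r g).contains (2 * t)) || decide (((pvDictOf r g).getD (2 * t) []).length < (s ++ [2 * t]).length) then
          ((pvDictOf r g).insert (2 * t) (s ++ [2 * t]), true)
        else (pvDictOf r g, b))
       else (pvDictOf r g, b))
      = (pvDictOf r g1, if 2 * t < r ∧ (g (2 * t)).length < (s ++ [2 * t]).length then true else b) := by
    by_cases hd : 2 * t < r
    · rw [if_pos hd, pvStep1 r g (2 * t) (s ++ [2 * t]) b (by omega) hd, hg1, if_pos hd]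
      by_cases hl : (g (2 * t)).length < (s ++ [2 * t]).length
      · rw [if_pos hl, if_pos ⟨hd, hl⟩]
      · rw [if_neg hl, if_neg (by tauto)]
    · rw [if_neg hd, hg1, if_neg hd, if_neg (by tauto)]
  set b₁ : Bool := if 2 * t < r ∧ (g (2 * t)).length < (s ++ [2 * t]).length then true else b with hb₁
  have stage2 :
      (if t + 6 < r then
        (if !((pvDictOf r g1).contains (t + 6)) || decide (((pvDictOf r g1).getD (t + 6) []).length < (s ++ [t + 6]).length) then
          ((pvDictOf r g1).insert (t + 6) (s ++ [t + 6]), true)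
        else (pvDictOf r g1, b₁))
       else (pvDictOf r g1, b₁))
      = (pvDictOf r (pvPush r g t s),
         if t + 6 < r ∧ (g1 (t + 6)).length < (s ++ [t + 6]).length then true else b₁) := by
    by_cases h6 : t + 6 < r
    · rw [if_pos h6, pvStep1 r g1 (t + 6) (s ++ [t + 6]) b₁ (by omega) h6, hPush]
      simp only [← hg1]
      rw [if_pos h6]
      by_cases hl : (g1 (t + 6)).length < (s ++ [t + 6]).length
      · rw [if_pos hl, if_pos ⟨h6, hl⟩]
      · rw [if_neg hl, if_neg (by tauto)]
    · rw [if_neg h6, hPush]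
      simp only [← hg1]
      rw [if_neg h6, if_neg (by tauto)]
  refine ⟨if t + 6 < r ∧ (g1 (t + 6)).length < (s ++ [t + 6]).length then true else b₁, ?_, ?_, ?_, ?_⟩
  · show pvAStep r (pvDictOf r g, b) (t, s) = _
    unfold pvAStep
    simp only []
    rw [stage1]
    simp only []
    rw [stage2]
  · intro hb
    rw [hb₁, hb]
    split_ifs <;> simp
  · intro hfalse
    by_cases h6c : t + 6 < r ∧ (g1 (t + 6)).length < (s ++ [t + 6]).length
    · rw [if_pos h6c] at hfalse; exact absurd hfalse (by simp)
    · rw [if_neg h6c] at hfalse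
      rw [hb₁] at hfalse
      by_cases hdc : 2 * t < r ∧ (g (2 * t)).length < (s ++ [2 * t]).length
      · rw [if_pos hdc] at hfalse; exact absurd hfalse (by simp)
      · rw [if_neg hdc] at hfalse
        refine ⟨hfalse, ?_⟩
        intro u
        have hup1 : g1 u = g u := by
          rw [hg1]
          split_ifs with hd
          · unfold pvUpd
            by_cases hu : u = 2 * t
            · subst hu; rw [if_pos rfl]; unfold pvPick; rw [if_neg (by tauto)]
            · rw [if_neg hu]
          · rfl
        rw [hPush]
        simp only [← hg1]
        split_ifs with h6
        · unfold pvUpd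
          by_cases hu : u = t + 6
          · subst hu; rw [if_pos rfl]; unfold pvPick
            rw [if_neg (by tauto), hup1]
          · rw [if_neg hu, hup1]
        · exact hup1
  · intro hbf hbt
    by_cases h6c : t + 6 < r ∧ (g1 (t + 6)).length < (s ++ [t + 6]).length
    · refine ⟨t + 6, by omega, h6c.1, ?_⟩
      have hg1ge : (g (t + 6)).length ≤ (g1 (t + 6)).length := by
        rw [hg1]; split_ifs
        · exact pvUpd_len_ge _ _ _ _
        · omega
      have hres : pvPush r g t s (t + 6) = pvPick (g1 (t + 6)) (s ++ [t + 6]) := by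
        rw [hPush]
        simp only [← hg1]
        rw [if_pos h6c.1]
        unfold pvUpd
        rw [if_pos rfl]
      rw [hres]
      unfold pvPick
      rw [if_pos h6c.2]
      have := h6c.2
      omega
    · rw [if_neg h6c, hb₁, hbf] at hbt
      by_cases hdc : 2 * t < r ∧ (g (2 * t)).length < (s ++ [2 * t]).length
      · refine ⟨2 * t, by omega, hdc.1, ?_⟩
        have hstep1 : (s ++ [2 * t]).length ≤ (g1 (2 * t)).length := by
          rw [hg1, if_pos hdc.1]
          unfold pvUpd
          rw [if_pos rfl, pvPick_length]
          omega
        have hstep2 : (g1 (2 * t)).length ≤ (pvPush r g t s (2 * t)).length := by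
          rw [hPush]
          simp only [← hg1]
          split_ifs
          · exact pvUpd_len_ge _ _ _ _
          · omega
        have := hdc.2
        omega
      · rw [if_neg hdc] at hbt
        exact absurd hbt (by simp)
theorem pvPredL_sorted (v : Int) : (pvPredL v).Pairwise (· ≤ ·) := by
  rw [pvPredL_eq]
  split_ifs <;> simp <;> omega

theorem pvSorted_filter_succ {l : List Int} {t : Int} (hl : l.Pairwise (· ≤ ·)) :
    l.filter (fun p => decide (p < t + 1))
      = l.filter (fun p => decide (p < t)) ++ l.filter (fun p => decide (p = t)) := by
  induction l with
  | nil => rfl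
  | cons x l ih =>
    have hx := List.pairwise_cons.1 hl
    rcases lt_trichotomy x t with h | h | h
    · rw [List.filter_cons, List.filter_cons, List.filter_cons,
        if_pos (by simpa using (by omega : x < t + 1)),
        if_pos (by simpa using h), if_neg (by simp; omega)]
      rw [List.cons_append, ih hx.2]
    · subst h
      have hnil : l.filter (fun p => decide (p < x)) = [] :=
        List.filter_eq_nil_iff.2 (fun y hy => by have := hx.1 y hy; simp; omega)
      rw [List.filter_cons, List.filter_cons, List.filter_cons,
        if_pos (by simp), if_neg (by simp), if_pos (by simp), hnil]
      rw [List.nil_append]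
      congr 1
      apply List.filter_congr
      intro y hy
      have := hx.1 y hy
      simp only [decide_eq_decide]
      omega
    · have h1 : (x :: l).filter (fun p => decide (p < t + 1)) = [] :=
        List.filter_eq_nil_iff.2 (fun y hy => by
          rcases List.mem_cons.1 hy with rfl | hy
          · simp; omega
          · have := hx.1 y hy; simp; omega)
      have h2 : (x :: l).filter (fun p => decide (p < t)) = [] :=
        List.filter_eq_nil_iff.2 (fun y hy => by
          rcases List.mem_cons.1 hy with rfl | hy
          · simp; omega
          · have := hx.1 y hy; simp; omega)
      have h3 : (x :: l).filter (fun p => decide (p = t)) = [] :=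
        List.filter_eq_nil_iff.2 (fun y hy => by
          rcases List.mem_cons.1 hy with rfl | hy
          · simp; omega
          · have := hx.1 y hy; simp; omega)
      rw [h1, h2, h3]
      rfl
theorem pvPush_upTo (r : Int) (f : Int → List Int) {t : Int} (h1 : 1 ≤ t) (h2 : t < r) :
    ∀ w, 1 ≤ w → w < r → pvPush r (pvUpTo f t) t (f t) w = pvUpTo f (t + 1) w := by
  intro w hw hwr
  have hUp : pvUpTo f (t + 1) w
      = (((pvPredL w).filter (fun p => decide (p = t))).map (fun p => f p ++ [w])).foldl
          pvPick (pvUpTo f t w) := by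
    unfold pvUpTo
    rw [pvSorted_filter_succ (pvPredL_sorted w), List.map_append, List.foldl_append]
  rw [hUp]
  by_cases hw2 : w = 2 * t <;> by_cases hw6 : w = t + 6
  · -- w = 2t = t+6: t = 6, w = 12, double push
    have ht6 : t = 6 := by omega
    subst ht6
    subst hw2
    have hflt : ((pvPredL (2 * 6)).filter (fun p => decide (p = 6))) = [6, 6] := by decide
    rw [hflt]
    show pvPush r (pvUpTo f 6) 6 (f 6) (2 * 6)
      = pvPick (pvPick (pvUpTo f 6 (2 * 6)) (f 6 ++ [2 * 6])) (f 6 ++ [2 * 6])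
    unfold pvPush pvUpd
    rw [if_pos (show 2 * 6 < r by omega), if_pos (show (6:Int) + 6 < r by omega)]
    rw [if_pos (show (2:Int) * 6 = 6 + 6 by norm_num), if_pos rfl]
    norm_num
  · -- w = 2t only
    subst hw2
    have hflt : ((pvPredL (2 * t)).filter (fun p => decide (p = t))) = [t] := by
      rw [pvPredL_eq]
      have hmod : 2 * t % 2 = 0 := by omega
      have hdiv : 2 * t / 2 = t := by omega
      have hne : 2 * t - 6 ≠ t := by omega
      split_ifs <;> simp [List.filter, hdiv, hne] <;> omega
    rw [hflt]
    show pvPush r (pvUpTo f t) t (f t) (2 * t) = pvPick (pvUpTo f t (2 * t)) (f t ++ [2 * t])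
    unfold pvPush pvUpd
    rw [if_pos (show 2 * t < r by omega)]
    by_cases h6 : t + 6 < r
    · rw [if_pos h6, if_neg (show ¬ (2 * t = t + 6) from hw6), if_pos rfl]
    · rw [if_neg h6, if_pos rfl]
  · -- w = t+6 only
    subst hw6
    have hflt : ((pvPredL (t + 6)).filter (fun p => decide (p = t))) = [t] := by
      rw [pvPredL_eq]
      have hsub : t + 6 - 6 = t := by omega
      by_cases hmod : (t + 6) % 2 = 0
      · have hne : (t + 6) / 2 ≠ t := by omega
        rw [if_pos hmod, if_pos (by omega)]
        split_ifs <;> simp [List.filter, hsub, hne]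
      · rw [if_neg hmod, if_pos (by omega)]
        simp [List.filter, hsub]
    rw [hflt]
    show pvPush r (pvUpTo f t) t (f t) (t + 6) = pvPick (pvUpTo f t (t + 6)) (f t ++ [t + 6])
    unfold pvPush pvUpd
    rw [if_pos (show t + 6 < r from hwr)]
    by_cases hd : 2 * t < r
    · rw [if_pos hd, if_pos rfl, if_neg (show ¬ (t + 6 = 2 * t) by omega)]
    · rw [if_neg hd, if_pos rfl]
  · -- neither target
    have hflt : ((pvPredL w).filter (fun p => decide (p = t))) = [] := by
      apply List.filter_eq_nil_iff.2
      intro p hp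
      rw [pvPredL_eq] at hp
      split_ifs at hp <;> simp at hp ⊢ <;> omega
    rw [hflt]
    show pvPush r (pvUpTo f t) t (f t) w = pvUpTo f t w
    unfold pvPush pvUpd
    by_cases hd : 2 * t < r <;> by_cases h6 : t + 6 < r <;>
      simp only [if_pos, if_neg, hd, h6, if_true, if_false] <;> simp [hw2, hw6]
theorem pvRoundAux (r : Int) (f : Int → List Int) :
    ∀ (n : Nat) (t : Int) (b : Bool), 1 ≤ t → t ≤ r → (r - t).toNat = n →
    ∃ b' : Bool,
      ((PySem.List.pyRange t r 1).map (fun v => (v, f v))).foldl (pvAStep r) (pvDictOf r (pvUpTo f t), b)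
        = (pvDictOf r (pvUpTo f r), b')
      ∧ (b = true → b' = true)
      ∧ (b' = false → b = false ∧ ∀ w, 1 ≤ w → w < r → pvUpTo f r w = pvUpTo f t w)
      ∧ (b = false → b' = true → ∃ w, 1 ≤ w ∧ w < r ∧ (f w).length < (pvUpTo f r w).length) := by
  intro n
  induction n with
  | zero =>
    intro t b h1 h2 hn
    have ht : t = r := by omega
    subst ht
    rw [PySem.List.pyRange_one_eq_nil (le_refl t)]
    simp only [List.map_nil, List.foldl_nil]
    refine ⟨b, rfl, fun h => h, ?_, ?_⟩
    · intro h
      exact ⟨h, fun w _ _ => trivial⟩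
    · intro hb hb'
      rw [hb] at hb'
      exact absurd hb' (by simp)
  | succ n ih =>
    intro t b h1 h2 hn
    have htr : t < r := by omega
    rw [PySem.List.pyRange_one_cons htr]
    simp only [List.map_cons, List.foldl_cons]
    obtain ⟨b₂, heq, hmono, hfalse, hstrict⟩ := pvAStep_dictOf r t (pvUpTo f t) (f t) b h1
    rw [heq]
    have hdict : pvDictOf r (pvPush r (pvUpTo f t) t (f t)) = pvDictOf r (pvUpTo f (t + 1)) :=
      pvDictOf_congr (fun w hw hwr => pvPush_upTo r f h1 htr w hw hwr)
    rw [hdict]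
    obtain ⟨b', heq', hmono', hfalse', hstrict'⟩ := ih (t + 1) b₂ (by omega) (by omega) (by omega)
    refine ⟨b', heq', ?_, ?_, ?_⟩
    · intro hb; exact hmono' (hmono hb)
    · intro hb'
      obtain ⟨hb₂, hstable'⟩ := hfalse' hb'
      obtain ⟨hb, hpush⟩ := hfalse hb₂
      refine ⟨hb, ?_⟩
      intro w hw hwr
      rw [hstable' w hw hwr, ← pvPush_upTo r f h1 htr w hw hwr, hpush w]
    · intro hb hb'
      by_cases hb₂ : b₂ = true
      · obtain ⟨w, hw1, hwr, hlen⟩ := hstrict hb hb₂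
        refine ⟨w, hw1, hwr, ?_⟩
        have e2 : pvPush r (pvUpTo f t) t (f t) w = pvUpTo f (t + 1) w :=
          pvPush_upTo r f h1 htr w hw1 hwr
        have e3 := pvUpTo_len_mono f (show t + 1 ≤ r by omega) w
        have e1 := pvUpTo_len_ge f t w
        rw [e2] at hlen
        omega
      · have hb₂f : b₂ = false := by revert hb₂; cases b₂ <;> simp
        exact hstrict' hb₂f hb'

theorem pvRound (r : Int) (hr : 2 ≤ r) (k : Nat) :
    ∃ b' : Bool,
      (pvDictOf r (pvBk k)).items.foldl (pvAStep r) (pvDictOf r (pvBk k), false)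
        = (pvDictOf r (pvBk (k + 1)), b')
      ∧ (b' = false → ∀ w, 1 ≤ w → w < r → pvBk (k + 1) w = pvBk k w)
      ∧ (b' = true → ∃ w, 1 ≤ w ∧ w < r ∧ (pvBk k w).length < (pvBk (k + 1) w).length) := by
  have h0 : pvDictOf r (pvBk k) = pvDictOf r (pvUpTo (pvBk k) 1) :=
    pvDictOf_congr (fun w hw _ => (pvUpTo_one (pvBk k) w hw).symm)
  obtain ⟨b', heq, _, hfalse, hstrict⟩ :=
    pvRoundAux r (pvBk k) (r - 1).toNat 1 false (by omega) (by omega) (by omega)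
  have hend : pvDictOf r (pvUpTo (pvBk k) r) = pvDictOf r (pvBk (k + 1)) :=
    pvDictOf_congr (fun w hw hwr => by rw [pvUpTo_top (pvBk k) hw hwr, pvBk_succ])
  refine ⟨b', ?_, ?_, ?_⟩
  · rw [pvDictOf_items, h0, heq, hend]
  · intro hb' w hw hwr
    obtain ⟨-, hstable⟩ := hfalse hb'
    have h3 := hstable w hw hwr
    rw [pvUpTo_one _ w hw, pvUpTo_top (pvBk k) hw hwr] at h3
    rw [pvBk_succ]
    exact h3
  · intro hb'
    obtain ⟨w, hw, hwr, hlen⟩ := hstrict rfl hb'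
    refine ⟨w, hw, hwr, ?_⟩
    rw [pvUpTo_top (pvBk k) hw hwr] at hlen
    rw [pvBk_succ]
    exact hlen

def pvSum (r : Int) (k : Nat) : Nat :=
  ((PySem.List.pyRange 1 r 1).map (fun v => (pvBk k v).length)).sum

def pvBound (r : Int) : Nat := ((PySem.List.pyRange 1 r 1).map (fun v => v.toNat)).sum

theorem pvSum_le_bound (r : Int) (k : Nat) : pvSum r k ≤ pvBound r := by
  unfold pvSum pvBound
  apply List.sum_le_sum
  intro v hv
  exact pvBk_len_le k v (PySem.List.mem_pyRange_one.1 hv).1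

theorem pvBk_len_mono (k : Nat) (v : Int) : (pvBk k v).length ≤ (pvBk (k + 1) v).length := by
  rw [pvBk_succ, pvFoldPick_length]; omega

theorem pvLoop_best (r : Int) (hr : 2 ≤ r) :
    ∀ (fuel : Nat) (k : Nat), pvBound r < pvSum r k + fuel →
    ∃ k' : Nat, pvALoop r fuel (pvDictOf r (pvBk k)) = pvDictOf r (pvBk k')
      ∧ ∀ v, 1 ≤ v → v < r → pvBk k' v = pvBest v := by
  intro fuel
  induction fuel with
  | zero => intro k hk; exact absurd (pvSum_le_bound r k) (by omega)
  | succ fuel ih =>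
    intro k hk
    obtain ⟨b', heq, hfalse, hstrict⟩ := pvRound r hr k
    have hunf : pvALoop r (fuel + 1) (pvDictOf r (pvBk k))
        = (if ((pvDictOf r (pvBk k)).items.foldl (pvAStep r) (pvDictOf r (pvBk k), false)).2 then
             pvALoop r fuel ((pvDictOf r (pvBk k)).items.foldl (pvAStep r) (pvDictOf r (pvBk k), false)).1
           else pvDictOf r (pvBk k)) := rfl
    rw [hunf, heq]
    cases b' with
    | true =>
      simp only [if_true]
      have hsum : pvSum r k < pvSum r (k + 1) := by
        unfold pvSum
        obtain ⟨w, hw, hwr, hlen⟩ := hstrict rfl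
        exact List.sum_lt_sum _ _ (fun v _ => pvBk_len_mono k v)
          ⟨w, PySem.List.mem_pyRange_one.2 ⟨hw, hwr⟩, hlen⟩
      exact ih (k + 1) (by omega)
    | false =>
      simp only [if_false]
      exact ⟨k, rfl, pvBk_stable_best (hfalse rfl)⟩

def pvAns (r : Int) : List Int := ((PySem.List.pyRange 1 r 1).map pvBest).foldl pvPick []

theorem pvA_main (r : Int) (hr : ¬ r ≤ 1) : find_optimal_sequence r = pvAns r := by
  have hr2 : 2 ≤ r := by omega
  unfold find_optimal_sequence
  rw [if_neg hr]
  show (pvALoop r (r.toNat * r.toNat + 1)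
      ((PySem.List.pyRange 1 r 1).foldl (fun d v => d.insert v [v]) PySem.Dict.empty)).values.foldl
      pvPick [] = pvAns r
  have hinit : (PySem.List.pyRange 1 r 1).foldl (fun d v => d.insert v [v]) PySem.Dict.empty
      = pvDictOf r (pvBk 0) := by
    apply PySem.Dict.ext
    have h := PySem.Dict.items_foldl_insert_fresh (PySem.List.pyRange 1 r 1)
      (fun a => a) (fun a => ([a] : List Int)) PySem.Dict.empty
      (fun a _ => by simp) (by simpa using PySem.List.nodup_pyRange_one 1 r)
    rw [h]
    rfl
  rw [hinit]
  have hfuel : pvBound r < pvSum r 0 + (r.toNat * r.toNat + 1) := by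
    have hb : pvBound r ≤ r.toNat * r.toNat := by
      unfold pvBound
      have h := List.sum_le_card_nsmul ((PySem.List.pyRange 1 r 1).map (fun v => v.toNat)) r.toNat
        (fun x hx => by
          rcases List.mem_map.1 hx with ⟨v, hv, rfl⟩
          have := PySem.List.mem_pyRange_one.1 hv
          omega)
      rw [List.length_map, PySem.List.length_pyRange_one, smul_eq_mul] at h
      have : (r - 1).toNat ≤ r.toNat := by omega
      calc ((PySem.List.pyRange 1 r 1).map (fun v => v.toNat)).sum ≤ (r - 1).toNat * r.toNat := h
        _ ≤ r.toNat * r.toNat := by exact Nat.mul_le_mul_right _ this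
    omega
  obtain ⟨k', hloop, hbest⟩ := pvLoop_best r hr2 (r.toNat * r.toNat + 1) 0 hfuel
  rw [hloop, pvDictOf_values]
  unfold pvAns
  congr 1
  exact List.map_congr_left (fun v hv => by
    have h := PySem.List.mem_pyRange_one.1 hv
    exact hbest v h.1 h.2)

theorem pvBAux (r : Int) :
    ∀ (n : Nat) (t : Int), 1 ≤ t → t ≤ r → (r - t).toNat = n →
    ((PySem.List.pyRange t r 1).foldl
        (fun (st : PySem.Dict Int (List Int) × List Int) v =>
          let seq := (pvPredL v).foldl (fun s p => pvPick s (st.1.getD p [] ++ [v])) [v]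
          (st.1.insert v seq, pvPick st.2 seq))
        (PySem.Dict.mk ((PySem.List.pyRange 1 t 1).map (fun v => (v, pvBest v))),
         ((PySem.List.pyRange 1 t 1).map pvBest).foldl pvPick [])).2
    = pvAns r := by
  intro n
  induction n with
  | zero =>
    intro t h1 h2 hn
    have ht : t = r := by omega
    subst ht
    rw [PySem.List.pyRange_one_eq_nil (le_refl t)]
    rfl
  | succ n ih =>
    intro t h1 h2 hn
    have htr : t < r := by omega
    rw [PySem.List.pyRange_one_cons htr]
    simp only [List.foldl_cons]
    have hseq : (pvPredL t).foldl
        (fun s p => pvPick s ((PySem.Dict.mk ((PySem.List.pyRange 1 t 1).map (fun v => (v, pvBest v)))).getD p [] ++ [t])) [t]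
        = pvBest t := by
      rw [pvBest_eq t (by omega)]
      unfold pvCands
      rw [List.foldl_map]
      apply List.foldl_ext
      intro acc p hp
      have hb := pvPredL_bounds (by omega : (1:Int) ≤ t) hp
      rw [show (PySem.Dict.mk ((PySem.List.pyRange 1 t 1).map (fun v => (v, pvBest v)))) = pvDictOf t pvBest from rfl,
        pvDictOf_getD t pvBest hb.1 hb.2]
    have hins : (PySem.Dict.mk ((PySem.List.pyRange 1 t 1).map (fun v => (v, pvBest v)))).insert t (pvBest t)
        = PySem.Dict.mk ((PySem.List.pyRange 1 (t + 1) 1).map (fun v => (v, pvBest v))) := by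
      apply PySem.Dict.ext
      rw [PySem.Dict.items_insert_of_not_contains _ _
        (by rw [show (PySem.Dict.mk ((PySem.List.pyRange 1 t 1).map (fun v => (v, pvBest v)))) = pvDictOf t pvBest from rfl,
              pvDictOf_contains]
            simp)]
      rw [PySem.List.pyRange_one_succ_right (by omega : (1:Int) ≤ t), List.map_append]
      rfl
    have hacc : pvPick (((PySem.List.pyRange 1 t 1).map pvBest).foldl pvPick []) (pvBest t)
        = ((PySem.List.pyRange 1 (t + 1) 1).map pvBest).foldl pvPick [] := by
      rw [PySem.List.pyRange_one_succ_right (by omega : (1:Int) ≤ t), List.map_append,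
        List.foldl_append]
      rfl
    rw [hseq, hins, hacc]
    exact ih (t + 1) (by omega) (by omega) (by omega)

theorem pvB_main (r : Int) (hr : ¬ r ≤ 1) : find_optimal_sequence_alt r = pvAns r := by
  unfold find_optimal_sequence_alt
  rw [if_neg hr]
  have h := pvBAux r (r - 1).toNat 1 (le_refl 1) (by omega) (by omega)
  rw [PySem.List.pyRange_one_eq_nil (le_refl 1)] at h
  exact h


-- ===== VERDICT (by name: the statement is the Claim_ definition above) =====
theorem find_optimal_sequence_spec : Claim_equal_find_optimal_sequence := by
  intro r _
  unfold Spec_find_optimal_sequence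
  by_cases hr : r ≤ 1
  · simp [find_optimal_sequence, find_optimal_sequence_alt, hr]
  · rw [pvA_main r hr, pvB_main r hr]
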